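-- pv_equiv track=rewrite | github.com/espressif/esp-idf | tools/split_paths_by_spaces.py | selective_join
-- ===== SOURCE A (Python) =====
-- import typing
--
-- def selective_join(parts: typing.List[str], n: int) -> typing.List[str]:
--     """
--     Given the list of N+1 strings, and an integer n in [0, 2**N - 1] range,
--     concatenate i-th and (i+1)-th string with space inbetween if bit i is not set in n.
--     Examples:
--          selective_join(['a', 'b', 'c'], 0b00) == ['a b c']
--          selective_join(['a', 'b', 'c'], 0b01) == ['a', 'b c']
--          selective_join(['a', 'b', 'c'], 0b10) == ['a b', 'c']
--          selective_join(['a', 'b', 'c'], 0b11) == ['a', 'b', 'c']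
--
--     This function is used as part of finding all the ways to split a string by spaces.
--
--     :param parts: Strings to join
--     :param n: Integer (bit map) to set the positions to join
--     :return: resulting list of strings
--     """
--     result = []
--     concatenated = [parts[0]]
--     for part in parts[1:]:
--         if n & 1:
--             result.append(' '.join(concatenated))
--             concatenated = [part]
--         else:
--             concatenated.append(part)
--         n >>= 1
--     if concatenated:
--         result.append(' '.join(concatenated))
--     return result
-- ===== SOURCE B (Python) =====
-- def selective_join(parts, n):
--     bounds = [0] + [i for i in range(1, len(parts)) if (n >> (i - 1)) & 1] + [len(parts)]
--     return [' '.join(parts[a:b]) for a, b in zip(bounds, bounds[1:])]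
-- ===== Notes on version B (the rewrite author's own statement) =====
-- stated objective: alternative
-- what changed: B replaces A's accumulate-and-flush loop (group buffer, bit-by-bit mutation of n) by a two-phase computation: first the cut positions read off the bitmask, then one slice-and-join per consecutive pair of boundaries.
import Mathlib
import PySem

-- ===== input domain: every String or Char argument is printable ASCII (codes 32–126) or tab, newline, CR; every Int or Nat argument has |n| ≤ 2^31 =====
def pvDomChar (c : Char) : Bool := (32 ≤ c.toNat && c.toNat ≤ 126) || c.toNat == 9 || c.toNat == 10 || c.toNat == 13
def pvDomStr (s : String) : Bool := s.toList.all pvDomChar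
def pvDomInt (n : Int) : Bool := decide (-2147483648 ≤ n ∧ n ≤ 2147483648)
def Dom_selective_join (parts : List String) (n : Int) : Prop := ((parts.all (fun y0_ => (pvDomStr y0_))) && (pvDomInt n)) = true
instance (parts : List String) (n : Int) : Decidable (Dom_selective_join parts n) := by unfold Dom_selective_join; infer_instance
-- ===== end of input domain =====

-- B replaces A's accumulate-and-flush loop by a two-phase computation: cut positions
-- read off the bitmask, then one slice-and-join per consecutive pair of boundaries.


-- ===== PORT A =====
-- body of A's for-loop; state = (result, concatenated, n)
def pvStepA (st : List String × List String × Int) (part : String) : List String × List String × Int :=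
  if PySem.Int.band st.2.2 1 ≠ 0 then
    (st.1 ++ [PySem.Str.join " " st.2.1], [part], st.2.2 >>> (1 : Nat))
  else
    (st.1, st.2.1 ++ [part], st.2.2 >>> (1 : Nat))

def selective_join (parts : List String) (n : Int) : List String :=
  match PySem.List.pyGet? parts 0 with
  | none => []  -- parts[0] raises IndexError on empty input; excluded by Pre_
  | some p0 =>
    let st := (PySem.List.slice parts (some 1) none).foldl pvStepA ([], [p0], n)
    if st.2.1 ≠ [] then st.1 ++ [PySem.Str.join " " st.2.1] else st.1

-- ===== PORT B =====
-- 'bit i-1 of n is set', the comprehension's condition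
def pvBit (n : Int) (i : Int) : Bool := PySem.Int.band (n >>> (i - 1).toNat) 1 != 0

def selective_join_alt (parts : List String) (n : Int) : List String :=
  let bounds : List Int :=
    0 :: (((PySem.List.pyRange 1 (PySem.List.len parts) 1).filter (pvBit n)) ++ [PySem.List.len parts])
  (bounds.zip bounds.tail).map
    (fun ab => PySem.Str.join " " (PySem.List.slice parts (some ab.1) (some ab.2)))

-- ===== PRECONDITION & SPEC =====
-- Pre_ excludes only the empty list, on which A's parts[0] raises IndexError.
def Pre_selective_join (parts : List String) (n : Int) : Prop := parts ≠ []
instance (parts : List String) (n : Int) : Decidable (Pre_selective_join parts n) := by unfold Pre_selective_join; infer_instance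

def pvWitness_selective_join : List String × Int := (["ab", "c"], 1)

def Spec_selective_join (parts : List String) (n : Int) (out : List String) : Prop := out = selective_join_alt parts n
instance (parts : List String) (n : Int) (out : List String) : Decidable (Spec_selective_join parts n out) := by unfold Spec_selective_join; infer_instance

-- ===== CLAIM (what is proved, stated in full; the proofs are below) =====
def Claim_equal_selective_join : Prop := ∀ (parts : List String) (n : Int), Dom_selective_join parts n → Pre_selective_join parts n → Spec_selective_join parts n (selective_join parts n)

-- ===== LEMMAS AND PROOFS =====

-- common recursive shape both programs compute: the open group's string is carried along
def pvAltU (s : String) (tail : List String) (m : Int) : List String :=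
  match tail with
  | [] => [s]
  | part :: t =>
    if PySem.Int.band m 1 ≠ 0 then s :: pvAltU part t (m >>> (1 : Nat))
    else pvAltU (s ++ " " ++ part) t (m >>> (1 : Nat))

-- merge a string into the head of a nonempty list (shape of B's first segment)
def pvGlue (s : String) (r : List String) : List String :=
  match r with
  | [] => [s]
  | q :: qs => (s ++ " " ++ q) :: qs

-- B's two phases, named for the proofs (definitionally the two parts of the port's body)
def pvCuts (n : Int) (len : Int) : List Int :=
  (PySem.List.pyRange 1 len 1).filter (pvBit n)

def pvSeg (xs : List String) (bs : List Int) : List String :=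
  (bs.zip bs.tail).map (fun ab => PySem.Str.join " " (PySem.List.slice xs (some ab.1) (some ab.2)))

lemma pvAlt_eq_seg (parts : List String) (n : Int) :
    selective_join_alt parts n = pvSeg parts (0 :: (pvCuts n (PySem.List.len parts) ++ [PySem.List.len parts])) := rfl

-- ---- string-join facts ----
lemma pvOfList_eq (l : List Char) (s : String) (h : l = s.toList) : String.ofList l = s := by
  rw [h, String.ofList_toList]

lemma pvJoin_singleton (p : String) : PySem.Str.join " " [p] = p := by
  simp [PySem.Str.join]

lemma pvCharsJoin_append (sep : List Char) (l : List (List Char)) (q : List Char) (h : l ≠ []) :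
    PySem.Chars.join sep (l ++ [q]) = PySem.Chars.join sep l ++ sep ++ q := by
  induction l with
  | nil => exact absurd rfl h
  | cons a rest ih =>
    cases rest with
    | nil => simp [PySem.Chars.join_cons_cons, PySem.Chars.join_singleton]
    | cons b r =>
      have h2 := ih (by simp)
      rw [List.cons_append] at h2
      simp only [List.cons_append, PySem.Chars.join_cons_cons, h2, List.append_assoc]

lemma pvJoin_append_singleton (conc : List String) (q : String) (h : conc ≠ []) :
    PySem.Str.join " " (conc ++ [q]) = PySem.Str.join " " conc ++ " " ++ q := by
  simp only [PySem.Str.join, List.map_append, List.map_cons, List.map_nil]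
  rw [pvCharsJoin_append _ _ _ (by simpa using h)]
  exact pvOfList_eq _ _ (by simp)

lemma pvJoin_cons (p : String) (l : List String) (h : l ≠ []) :
    PySem.Str.join " " (p :: l) = p ++ " " ++ PySem.Str.join " " l := by
  obtain ⟨x, xs, rfl⟩ := List.exists_cons_of_ne_nil h
  simp only [PySem.Str.join, List.map_cons]
  rw [PySem.Chars.join_cons_cons]
  exact pvOfList_eq _ _ (by simp)

lemma pvJoin_merged_head (s q : String) (l : List String) :
    PySem.Str.join " " ((s ++ " " ++ q) :: l) = s ++ " " ++ PySem.Str.join " " (q :: l) := by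
  cases l with
  | nil => rw [pvJoin_singleton, pvJoin_singleton]
  | cons x xs =>
    rw [pvJoin_cons (s ++ " " ++ q) (x :: xs) (by simp), pvJoin_cons q (x :: xs) (by simp)]
    simp [String.append_assoc]

-- ---- A's loop computes pvAltU ----
lemma pvA_loop (tail : List String) : ∀ (m : Int) (res conc : List String), conc ≠ [] →
    (if (tail.foldl pvStepA (res, conc, m)).2.1 ≠ [] then
       (tail.foldl pvStepA (res, conc, m)).1 ++
         [PySem.Str.join " " (tail.foldl pvStepA (res, conc, m)).2.1]
     else (tail.foldl pvStepA (res, conc, m)).1)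
    = res ++ pvAltU (PySem.Str.join " " conc) tail m := by
  induction tail with
  | nil =>
    intro m res conc h
    simp [pvAltU, h]
  | cons part t ih =>
    intro m res conc h
    by_cases hb : PySem.Int.band m 1 ≠ 0
    · simp only [List.foldl_cons, pvStepA]
      rw [if_pos hb]
      rw [ih (m >>> (1 : Nat)) (res ++ [PySem.Str.join " " conc]) [part] (by simp)]
      simp [pvAltU, hb, pvJoin_singleton, List.append_assoc]
    · simp only [List.foldl_cons, pvStepA]
      rw [if_neg hb]
      rw [ih (m >>> (1 : Nat)) res (conc ++ [part]) (by simp)]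
      simp [pvAltU, hb, pvJoin_append_singleton conc part h]

-- ---- range and slice shifting facts ----
lemma pvRange_shift : ∀ (k : Nat) (a b : Int), (b - a).toNat = k →
    PySem.List.pyRange (a + 1) (b + 1) 1 = (PySem.List.pyRange a b 1).map (· + 1) := by
  intro k
  induction k with
  | zero =>
    intro a b h
    rw [PySem.List.pyRange_one_eq_nil (by omega), PySem.List.pyRange_one_eq_nil (by omega)]
    rfl
  | succ k ih =>
    intro a b h
    rw [PySem.List.pyRange_one_cons (by omega : a < b),
        PySem.List.pyRange_one_cons (by omega : a + 1 < b + 1)]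
    rw [List.map_cons, ih (a + 1) b (by omega)]

lemma pvSlice_shift (x : String) (xs : List String) (a b : Int) (ha : 0 ≤ a) (hb : 0 ≤ b) :
    PySem.List.slice (x :: xs) (some (a + 1)) (some (b + 1)) = PySem.List.slice xs (some a) (some b) := by
  rw [PySem.List.slice_toNat _ (by omega) (by omega), PySem.List.slice_toNat _ ha hb]
  have h1 : (a + 1).toNat = a.toNat + 1 := by omega
  rw [h1]
  have h2 : (b + 1).toNat - (a.toNat + 1) = b.toNat - a.toNat := by omega
  rw [h2, List.drop_succ_cons]

lemma pvSlice_head_irrel (x y : String) (xs : List String) (a b : Int) (ha : 1 ≤ a) (hb : 0 ≤ b) :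
    PySem.List.slice (x :: xs) (some a) (some b) = PySem.List.slice (y :: xs) (some a) (some b) := by
  rw [PySem.List.slice_toNat _ (by omega) hb, PySem.List.slice_toNat _ (by omega) hb]
  obtain ⟨k, hk⟩ : ∃ k, a.toNat = k + 1 := ⟨a.toNat - 1, by omega⟩
  rw [hk, List.drop_succ_cons, List.drop_succ_cons]

lemma pvSlice_zero_cons (x : String) (xs : List String) (b : Int) (hb : 1 ≤ b) :
    PySem.List.slice (x :: xs) (some 0) (some b) = x :: PySem.List.slice xs (some 0) (some (b - 1)) := by
  rw [PySem.List.slice_toNat _ (by omega) (by omega), PySem.List.slice_toNat _ (by omega) (by omega)]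
  obtain ⟨k, hk⟩ : ∃ k, b.toNat = k + 1 := ⟨b.toNat - 1, by omega⟩
  have h2 : (b - 1).toNat = k := by omega
  simp [hk, h2]

-- ---- cut/boundary structure ----
lemma pvCuts_cons (p : String) (rest : List String) (n : Int) (h : rest ≠ []) :
    pvCuts n (PySem.List.len (p :: rest)) =
      (if PySem.Int.band n 1 ≠ 0 then [1] else []) ++ (pvCuts (n >>> (1 : Nat)) (PySem.List.len rest)).map (· + 1) := by
  obtain ⟨r0, rs, rfl⟩ := List.exists_cons_of_ne_nil h
  have hL : 1 ≤ PySem.List.len (r0 :: rs) := by simp [pysem]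
  have hlen : PySem.List.len (p :: r0 :: rs) = PySem.List.len (r0 :: rs) + 1 := by
    simp [pysem]
  unfold pvCuts
  rw [hlen, PySem.List.pyRange_one_cons (by omega), List.filter_cons]
  have hbit1 : (pvBit n 1 = true) ↔ PySem.Int.band n 1 ≠ 0 := by
    simp [pvBit]
  have hrange : PySem.List.pyRange (1 + 1) (PySem.List.len (r0 :: rs) + 1) 1 =
      (PySem.List.pyRange 1 (PySem.List.len (r0 :: rs)) 1).map (· + 1) :=
    pvRange_shift (PySem.List.len (r0 :: rs) - 1).toNat 1 _ rfl
  rw [hrange, List.filter_map]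
  have hfc : List.filter (pvBit n ∘ (· + 1)) (PySem.List.pyRange 1 (PySem.List.len (r0 :: rs)) 1)
      = List.filter (pvBit (n >>> (1 : Nat))) (PySem.List.pyRange 1 (PySem.List.len (r0 :: rs)) 1) := by
    refine List.filter_congr ?_
    intro i hi
    have h1i : 1 ≤ i := (PySem.List.mem_pyRange_one.1 hi).1
    simp only [Function.comp, pvBit]
    have ht : (i + 1 - 1).toNat = (i - 1).toNat + 1 := by omega
    rw [ht]
    congr 2
    rw [add_comm, Int.shiftRight_add]
  rw [hfc]
  by_cases hb : PySem.Int.band n 1 ≠ 0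
  · rw [if_pos (hbit1.2 hb), if_pos hb]
    rfl
  · rw [if_neg (fun hh => hb (hbit1.1 hh)), if_neg hb]
    rfl

lemma pvCuts_mem (n len : Int) (i : Int) (h : i ∈ pvCuts n len) : 1 ≤ i ∧ i < len := by
  unfold pvCuts at h
  exact PySem.List.mem_pyRange_one.1 (List.mem_filter.1 h).1

-- the two segment-list reshaping lemmas
lemma pvSeg_cons_head (xs : List String) (d0 : Int) (ds' : List Int) :
    pvSeg xs (0 :: d0 :: ds') =
      PySem.Str.join " " (PySem.List.slice xs (some 0) (some d0)) :: pvSeg xs (d0 :: ds') := rfl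

lemma pvSeg_shift (x : String) (xs : List String) (bs : List Int) (hbs : ∀ b ∈ bs, 0 ≤ b) :
    pvSeg (x :: xs) (bs.map (· + 1)) = pvSeg xs bs := by
  unfold pvSeg
  rw [show (bs.map (· + 1)).tail = bs.tail.map (· + 1) from List.map_tail.symm, List.zip_map,
    List.map_map]
  refine List.map_congr_left ?_
  rintro ⟨a, b⟩ hab
  obtain ⟨ha, hb⟩ := List.of_mem_zip hab
  simp only [Function.comp, Prod.map]
  rw [pvSlice_shift x xs a b (hbs a ha) (hbs b (List.tail_subset _ hb))]

lemma pvSeg_head_irrel (x y : String) (xs : List String) (bs : List Int) (hbs : ∀ b ∈ bs, 1 ≤ b) :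
    pvSeg (x :: xs) bs = pvSeg (y :: xs) bs := by
  unfold pvSeg
  refine List.map_congr_left ?_
  rintro ⟨a, b⟩ hab
  obtain ⟨ha, hb⟩ := List.of_mem_zip hab
  have hb' := hbs b (List.tail_subset _ hb)
  rw [pvSlice_head_irrel x y xs a b (hbs a ha) (by omega)]

-- B satisfies pvAltU's recursion
lemma pvAlt_singleton (p : String) (n : Int) : selective_join_alt [p] n = [p] := by
  rw [pvAlt_eq_seg]
  have hl : PySem.List.len ([p] : List String) = 1 := by simp [pysem]
  rw [hl]
  have hc : pvCuts n 1 = [] := by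
    unfold pvCuts
    rw [PySem.List.pyRange_one_eq_nil le_rfl]
    rfl
  rw [hc, List.nil_append, pvSeg_cons_head]
  have hs : PySem.List.slice ([p] : List String) (some 0) (some 1) = [p] := by
    rw [PySem.List.slice_toNat _ (by omega) (by omega)]
    rfl
  rw [hs, pvJoin_singleton]
  rfl

lemma pvAlt_cons (p : String) (rest : List String) (n : Int) (h : rest ≠ []) :
    selective_join_alt (p :: rest) n =
      if PySem.Int.band n 1 ≠ 0 then p :: selective_join_alt rest (n >>> (1 : Nat))
      else pvGlue p (selective_join_alt rest (n >>> (1 : Nat))) := by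
  obtain ⟨r0, rs, rfl⟩ := List.exists_cons_of_ne_nil h
  rw [pvAlt_eq_seg, pvAlt_eq_seg, pvCuts_cons p (r0 :: rs) n (by simp)]
  have hlen : PySem.List.len (p :: r0 :: rs) = PySem.List.len (r0 :: rs) + 1 := by
    simp [pysem]
  rw [hlen]
  set L := PySem.List.len (r0 :: rs) with hLdef
  have hL : 1 ≤ L := by rw [hLdef]; simp [pysem]
  set cs := pvCuts (n >>> (1 : Nat)) L with hcs
  have hds0 : ∀ d ∈ cs ++ [L], 0 ≤ d := by
    intro d hd
    rcases List.mem_append.1 hd with h1 | h1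
    · have := (pvCuts_mem _ _ _ (hcs ▸ h1)).1; omega
    · simp at h1; omega
  have hmap : cs.map (· + 1) ++ [L + 1] = (cs ++ [L]).map (· + 1) := by simp
  have hp1 : PySem.Str.join " " (PySem.List.slice (p :: r0 :: rs) (some 0) (some 1)) = p := by
    have h1 : PySem.List.slice (p :: r0 :: rs) (some 0) (some 1) = [p] := by
      rw [PySem.List.slice_toNat _ (by omega) (by omega)]
      rfl
    rw [h1, pvJoin_singleton]
  by_cases hb : PySem.Int.band n 1 ≠ 0
  · rw [if_pos hb, if_pos hb]
    have hshape : ([1] ++ cs.map (· + 1)) ++ [L + 1] = 1 :: (cs ++ [L]).map (· + 1) := by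
      simp
    rw [hshape]
    have h1m : (1 : Int) :: (cs ++ [L]).map (· + 1) = (0 :: (cs ++ [L])).map (· + 1) := by
      simp
    have hmem0 : ∀ b ∈ 0 :: (cs ++ [L]), 0 ≤ b := by
      intro b hb'
      rcases List.mem_cons.1 hb' with h1 | h1
      · omega
      · exact hds0 b h1
    rw [pvSeg_cons_head, hp1, h1m, pvSeg_shift p (r0 :: rs) (0 :: (cs ++ [L])) hmem0]
  · rw [if_neg hb, if_neg hb]
    have hshape : (([] : List Int) ++ cs.map (· + 1)) ++ [L + 1] = (cs ++ [L]).map (· + 1) := by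
      simp
    rw [hshape]
    obtain ⟨d0, ds', hds⟩ := List.exists_cons_of_ne_nil (by simp : cs ++ [L] ≠ [])
    have hd0 : 1 ≤ d0 := by
      have hmem := hds ▸ List.mem_cons_self (a := d0) (l := ds')
      rcases List.mem_append.1 hmem with h1 | h1
      · exact (pvCuts_mem _ _ _ (hcs ▸ h1)).1
      · simp at h1; omega
    rw [hds, List.map_cons, pvSeg_cons_head]
    have hhead : PySem.List.slice (p :: r0 :: rs) (some 0) (some (d0 + 1)) =
        p :: PySem.List.slice (r0 :: rs) (some 0) (some d0) := by
      rw [pvSlice_zero_cons _ _ _ (by omega)]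
      norm_num
    have hne : PySem.List.slice (r0 :: rs) (some 0) (some d0) ≠ [] := by
      rw [PySem.List.slice_toNat _ (by omega) (by omega)]
      obtain ⟨k, hk⟩ : ∃ k, d0.toNat = k + 1 := ⟨d0.toNat - 1, by omega⟩
      simp [hk]
    rw [hhead, pvJoin_cons p _ hne]
    have htail : (d0 + 1) :: ds'.map (· + 1) = (d0 :: ds').map (· + 1) := by simp
    rw [htail, pvSeg_shift p (r0 :: rs) (d0 :: ds')
      (by intro b hb'; exact hds0 b (hds ▸ hb'))]
    rw [pvSeg_cons_head]
    rfl

lemma pvAlt_merged_head (s q : String) (t : List String) (m : Int) :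
    selective_join_alt ((s ++ " " ++ q) :: t) m = pvGlue s (selective_join_alt (q :: t) m) := by
  rw [pvAlt_eq_seg, pvAlt_eq_seg]
  have hlen : PySem.List.len ((s ++ " " ++ q) :: t) = PySem.List.len (q :: t) := by
    simp [pysem]
  rw [hlen]
  set L := PySem.List.len (q :: t) with hLdef
  have hL : 1 ≤ L := by rw [hLdef]; simp [pysem]
  have hds1 : ∀ d ∈ pvCuts m L ++ [L], 1 ≤ d := by
    intro d hd
    rcases List.mem_append.1 hd with h1 | h1
    · exact (pvCuts_mem _ _ _ h1).1
    · simp at h1; omega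
  obtain ⟨d0, ds', hds⟩ := List.exists_cons_of_ne_nil (by simp : pvCuts m L ++ [L] ≠ [])
  rw [hds]
  have hd0 : 1 ≤ d0 := hds1 d0 (hds ▸ List.mem_cons_self)
  rw [pvSeg_cons_head, pvSeg_cons_head]
  rw [pvSlice_zero_cons _ _ _ hd0, pvSlice_zero_cons _ _ _ hd0, pvJoin_merged_head]
  rw [pvSeg_head_irrel (s ++ " " ++ q) q t (d0 :: ds') (hds ▸ hds1)]
  rfl

lemma pvAltU_eq_alt (tail : List String) : ∀ (p : String) (n : Int),
    pvAltU p tail n = selective_join_alt (p :: tail) n := by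
  induction tail with
  | nil => intro p n; rw [pvAlt_singleton]; rfl
  | cons q t ih =>
    intro p n
    rw [pvAlt_cons p (q :: t) n (by simp)]
    by_cases hb : PySem.Int.band n 1 ≠ 0
    · rw [if_pos hb]
      simp only [pvAltU]
      rw [if_pos hb, ih]
    · rw [if_neg hb]
      simp only [pvAltU]
      rw [if_neg hb, ih, pvAlt_merged_head]

-- ===== VERDICT (by name: the statement is the Claim_ definition above) =====
theorem selective_join_spec : Claim_equal_selective_join := by
  intro parts n _ hpre
  unfold Pre_selective_join at hpre
  cases parts with
  | nil => exact absurd rfl hpre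
  | cons p tail =>
    unfold Spec_selective_join selective_join
    rw [PySem.List.pyGet?_zero_cons]
    rw [PySem.List.slice_from_one]
    have hA := pvA_loop tail n [] [p] (by simp)
    simp only [List.tail_cons]
    simp only [List.nil_append] at hA
    rw [pvJoin_singleton] at hA
    rw [hA, pvAltU_eq_alt]
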